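-- pv_equiv track=rewrite | github.com/xmaciejson/university | UWr/WDPP 2024/WDI LISTA 4.py | k_palindrom
-- ===== SOURCE A (Python) =====
-- def k_palindrom(n, k):
--     k_pal = ''
--     temp = n
--     while temp > 0:
--         k_pal += str(temp % k)
--         temp //= k
--
--     for i in range(len(k_pal) // 2):
--         if k_pal[i] != k_pal[len(k_pal) - 1 - i]:
--             return False
--
--     return True
-- ===== SOURCE B (Python) =====
-- def k_palindrom(n, k):
--     # Collect the decimal strings of the base-k digits (least significant first)
--     # by structural recursion, join them once, and compare with the reversed string.
--     def parts(t):
--         if t <= 0: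
--             return []
--         return [str(t % k)] + parts(t // k)
--     s = ''.join(parts(n))
--     return s == s[::-1]
-- ===== Notes on version B (the rewrite author's own statement) =====
-- stated objective: alternative
-- what changed: A appends each digit's decimal string to an accumulator string inside a while loop and then runs an index-based two-pointer loop with early return; B collects the digit strings by structural recursion, joins them once, and compares the string with its reversed slice (s == s[::-1]).
import Mathlib
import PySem

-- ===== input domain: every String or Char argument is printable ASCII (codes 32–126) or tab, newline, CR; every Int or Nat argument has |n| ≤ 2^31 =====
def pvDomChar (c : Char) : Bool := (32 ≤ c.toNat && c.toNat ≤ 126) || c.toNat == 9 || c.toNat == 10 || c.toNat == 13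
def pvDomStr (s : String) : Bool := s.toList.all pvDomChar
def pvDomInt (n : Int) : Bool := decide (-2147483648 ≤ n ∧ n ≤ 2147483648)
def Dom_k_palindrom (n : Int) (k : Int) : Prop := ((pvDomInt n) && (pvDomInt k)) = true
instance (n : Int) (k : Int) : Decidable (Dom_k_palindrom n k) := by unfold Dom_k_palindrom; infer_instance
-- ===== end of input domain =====

-- B replaces A's in-loop string accumulation + index two-pointer check by a recursively
-- collected list of digit strings joined once and compared with the reversed string
-- (alternative decomposition, same cost).

-- termination fact shared by both loops (cited by name in decreasing_by)
theorem kpal_div_toNat_lt (t k : Int) (h : 0 < t ∧ (2 ≤ k ∨ k ≤ -1)) :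
    (PySem.Int.floordiv t k).toNat < t.toNat := by
  rcases h.2 with hk | hk
  · rw [PySem.Int.floordiv_eq_ediv_of_pos (by omega)]
    have h1 : t / k < t := Int.ediv_lt_of_lt_mul (by omega) (by nlinarith)
    have h2 : 0 ≤ t / k := Int.ediv_nonneg (by omega) (by omega)
    omega
  · -- negative divisor: the floor quotient of a positive t is negative
    have hmb := PySem.Int.mod_neg_bounds t (b := k) (by omega)
    have heq := PySem.Int.floordiv_mul_add_mod t k
    have hneg : PySem.Int.floordiv t k < 0 := by nlinarith [heq, hmb.1, hmb.2, h.1]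
    omega

-- ===== PORT A =====
-- while temp > 0: k_pal += str(temp % k); temp //= k     ('2 ≤ k ∨ k ≤ -1' is a totality
-- guard; Pre_ excludes 0 < n with k ∈ {0, 1}, where Python raises resp. loops forever)
def kpalLoopA (k : Int) (temp : Int) (acc : List Char) : List Char :=
  if h : 0 < temp ∧ (2 ≤ k ∨ k ≤ -1) then
    kpalLoopA k (PySem.Int.floordiv temp k) (acc ++ PySem.Int.toChars (PySem.Int.mod temp k))
  else acc
termination_by temp.toNat
decreasing_by exact kpal_div_toNat_lt temp k h

-- for i in range(len(k_pal) // 2): if k_pal[i] != k_pal[len(k_pal)-1-i]: return False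
def kpalCheckA (s : List Char) : List Int → Bool
  | [] => true
  | i :: rest =>
      if PySem.List.pyGet? s i ≠ PySem.List.pyGet? s ((s.length : Int) - 1 - i) then false
      else kpalCheckA s rest

def k_palindrom (n : Int) (k : Int) : Bool :=
  let k_pal := kpalLoopA k n []
  kpalCheckA k_pal (PySem.List.pyRange 0 (PySem.Int.floordiv (k_pal.length : Int) 2) 1)

-- ===== PORT B =====
-- def parts(t): return [] if t <= 0 else [str(t % k)] + parts(t // k)   (same totality guard)
def kpalPartsB (k : Int) (t : Int) : List (List Char) :=
  if h : 0 < t ∧ (2 ≤ k ∨ k ≤ -1) then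
    PySem.Int.toChars (PySem.Int.mod t k) :: kpalPartsB k (PySem.Int.floordiv t k)
  else []
termination_by t.toNat
decreasing_by exact kpal_div_toNat_lt t k h

def k_palindrom_alt (n : Int) (k : Int) : Bool :=
  let s := PySem.Chars.join [] (kpalPartsB k n)
  s == (PySem.List.slice? s none none (-1)).getD []

-- ===== PRECONDITION & SPEC =====
-- Pre_ excludes only inputs on which A never returns: 0 < n with k = 0 (ZeroDivisionError)
-- or k = 1 (infinite loop).
def Pre_k_palindrom (n : Int) (k : Int) : Prop := n ≤ 0 ∨ 2 ≤ k ∨ k ≤ -1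
instance (n : Int) (k : Int) : Decidable (Pre_k_palindrom n k) := by unfold Pre_k_palindrom; infer_instance
def pvWitness_k_palindrom : Int × Int := (9, 2)

def Spec_k_palindrom (n : Int) (k : Int) (out : Bool) : Prop := out = k_palindrom_alt n k
instance (n : Int) (k : Int) (out : Bool) : Decidable (Spec_k_palindrom n k out) := by unfold Spec_k_palindrom; infer_instance

-- ===== CLAIM (what is proved, stated in full; the proofs are below) =====
def Claim_equal_k_palindrom : Prop := ∀ (n : Int) (k : Int), Dom_k_palindrom n k → Pre_k_palindrom n k → Spec_k_palindrom n k (k_palindrom n k)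

-- ===== LEMMAS AND PROOFS =====

theorem kpal_join_nil_eq_flatten (ps : List (List Char)) :
    PySem.Chars.join [] ps = ps.flatten := by
  induction ps with
  | nil => simp [PySem.Chars.join_nil]
  | cons a rest ih =>
      cases rest with
      | nil => simp [PySem.Chars.join_singleton]
      | cons b t =>
          rw [PySem.Chars.join_cons_cons, ih]
          simp

-- A's accumulated string is the concatenation of B's digit strings
theorem kpalLoopA_eq (k t : Int) (acc : List Char) :
    kpalLoopA k t acc = acc ++ (kpalPartsB k t).flatten := by
  unfold kpalLoopA kpalPartsB
  split
  · rw [kpalLoopA_eq k (PySem.Int.floordiv t k)]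
    simp
  · simp
termination_by t.toNat
decreasing_by exact kpal_div_toNat_lt t k ‹_›

theorem kpalCheckA_eq_all (s : List Char) (idxs : List Int) :
    kpalCheckA s idxs
      = idxs.all (fun i => PySem.List.pyGet? s i == PySem.List.pyGet? s ((s.length : Int) - 1 - i)) := by
  induction idxs with
  | nil => rfl
  | cons i rest ih =>
      unfold kpalCheckA
      by_cases h : PySem.List.pyGet? s i = PySem.List.pyGet? s ((s.length : Int) - 1 - i) <;>
        simp [h, ih]

-- half-range characterisation of a palindrome
theorem half_palindrome_iff {α : Type} (l : List α)
    (h : ∀ i : Nat, i < l.length / 2 → l[i]? = l[l.length - 1 - i]?) :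
    l.reverse = l := by
  apply List.ext_getElem?
  intro i
  rcases Nat.lt_or_ge i l.length with hi | hi
  · rw [List.getElem?_reverse hi]
    rcases Nat.lt_or_ge i (l.length / 2) with h2 | h2
    · exact (h i h2).symm
    · rcases Nat.lt_or_ge (l.length - 1 - i) (l.length / 2) with h3 | h3
      · have := h _ h3
        have hj : l.length - 1 - (l.length - 1 - i) = i := by omega
        rw [hj] at this
        exact this
      · have : l.length - 1 - i = i := by omega
        rw [this]
  · rw [List.getElem?_eq_none (by simpa using hi), List.getElem?_eq_none hi]

theorem palindrome_half {α : Type} (l : List α) (hrev : l.reverse = l) :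
    ∀ i : Nat, i < l.length → l[i]? = l[l.length - 1 - i]? := by
  intro i hi
  conv_lhs => rw [← hrev]
  rw [List.getElem?_reverse hi]

-- A's two-pointer loop over the half range succeeds iff the string is its own reverse
theorem checkA_iff (s : List Char) :
    (kpalCheckA s (PySem.List.pyRange 0 (PySem.Int.floordiv ((s.length : Int)) 2) 1) = true)
      ↔ s.reverse = s := by
  have hm : PySem.Int.floordiv ((s.length : Int)) 2 = ((s.length / 2 : Nat) : Int) := by
    rw [PySem.Int.floordiv_eq_ediv_of_pos (by omega)]
    omega
  rw [kpalCheckA_eq_all, List.all_eq_true, hm]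
  have hget : ∀ i : Nat, i < s.length →
      (PySem.List.pyGet? s (i : Int) == PySem.List.pyGet? s ((s.length : Int) - 1 - (i : Int)))
        = (s[i]? == s[s.length - 1 - i]?) := by
    intro i hi
    have e2 : (s.length : Int) - 1 - (i : Int) = ((s.length - 1 - i : Nat) : Int) := by omega
    rw [e2, PySem.List.pyGet?_natCast, PySem.List.pyGet?_natCast]
  constructor
  · intro h
    apply half_palindrome_iff s
    intro i hi
    have hmem : (i : Int) ∈ PySem.List.pyRange 0 ((s.length / 2 : Nat) : Int) 1 := by
      rw [PySem.List.mem_pyRange_one]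
      omega
    have := h _ hmem
    rw [hget i (by omega)] at this
    exact beq_iff_eq.mp this
  · intro hrev i hi
    rw [PySem.List.mem_pyRange_one] at hi
    have hiN : i = ((i.toNat : Nat) : Int) := by omega
    have hlt : i.toNat < s.length := by omega
    rw [hiN, hget i.toNat hlt]
    exact beq_iff_eq.mpr (palindrome_half s hrev i.toNat hlt)

-- ===== VERDICT (by name: the statement is the Claim_ definition above) =====
theorem k_palindrom_spec : Claim_equal_k_palindrom := by
  intro n k _ _
  unfold Spec_k_palindrom k_palindrom k_palindrom_alt
  show kpalCheckA (kpalLoopA k n [])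
        (PySem.List.pyRange 0 (PySem.Int.floordiv (((kpalLoopA k n []).length : Int)) 2) 1)
      = (PySem.Chars.join [] (kpalPartsB k n)
          == (PySem.List.slice? (PySem.Chars.join [] (kpalPartsB k n)) none none (-1)).getD [])
  rw [PySem.List.slice?_none_none_neg_one]
  simp only [Option.getD_some]
  rw [kpal_join_nil_eq_flatten, kpalLoopA_eq k n []]
  simp only [List.nil_append]
  rw [Bool.eq_iff_iff, checkA_iff, beq_iff_eq]
  exact eq_comm
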